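-- pv_equiv track=rewrite | github.com/lhgeer7485/ssafy_1 | 스터디/알고리즘/피보나치.py | fnc
-- ===== SOURCE A (Python) =====
-- def fnc(n):
--     zero = [1, 0, 1]
--     one = [0, 1, 1]
--
--     if n == 0:
--         return zero, one
--     elif n == 1:
--         return zero, one
--     elif n == 2:
--         return zero, one
--
--     else:
--         for x in range(3, n+1):
--             zero.append(zero[x-1] + zero[x-2])
--             one.append(one[x-1] + one[x-2])
--
--     return zero, one
-- ===== SOURCE B (Python) =====
-- def fnc(n):
--     if n < 3:
--         return [1, 0, 1], [0, 1, 1]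
--     zero = [1, 0, 1]
--     for x in range(3, n + 2):
--         zero.append(zero[x - 1] + zero[x - 2])
--     one = [0, 1] + zero[3:n + 2]
--     return zero[:n + 1], one
-- ===== Notes on version B (the rewrite author's own statement) =====
-- stated objective: alternative
-- what changed: B builds only the zero sequence one step further and derives one from the shift identity one[k] = zero[k+1], instead of A's loop maintaining both lists with the recurrence.
import Mathlib
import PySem

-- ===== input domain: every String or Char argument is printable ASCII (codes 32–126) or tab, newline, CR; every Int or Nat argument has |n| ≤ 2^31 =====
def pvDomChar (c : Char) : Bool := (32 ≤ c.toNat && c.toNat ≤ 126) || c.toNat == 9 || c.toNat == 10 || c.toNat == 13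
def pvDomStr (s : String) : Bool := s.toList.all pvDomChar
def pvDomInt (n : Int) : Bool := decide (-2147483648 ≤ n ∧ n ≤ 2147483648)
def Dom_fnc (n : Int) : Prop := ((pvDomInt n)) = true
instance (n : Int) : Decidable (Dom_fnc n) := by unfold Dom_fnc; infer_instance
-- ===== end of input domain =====

-- B derives the `one` list from the shift identity one[k] = zero[k+1] instead of
-- running A's recurrence on both lists; same O(n) cost, alternative decomposition.

-- ===== PORT A =====
-- zero[x-1] etc. are ported with pyGetD default 0; inside A's loop the index is
-- always in range, so the default is never used (exact).
def fncStep (p : List Int × List Int) (x : Int) : List Int × List Int :=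
  (p.1 ++ [PySem.List.pyGetD p.1 (x-1) 0 + PySem.List.pyGetD p.1 (x-2) 0],
   p.2 ++ [PySem.List.pyGetD p.2 (x-1) 0 + PySem.List.pyGetD p.2 (x-2) 0])

def fnc (n : Int) : List Int × List Int :=
  let zero : List Int := [1, 0, 1]
  let one : List Int := [0, 1, 1]
  if n = 0 then (zero, one)
  else if n = 1 then (zero, one)
  else if n = 2 then (zero, one)
  else (PySem.List.pyRange 3 (n+1) 1).foldl fncStep (zero, one)

-- ===== PORT B =====
def fncAltStep (z : List Int) (x : Int) : List Int :=
  z ++ [PySem.List.pyGetD z (x-1) 0 + PySem.List.pyGetD z (x-2) 0]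

def fnc_alt (n : Int) : List Int × List Int :=
  if n < 3 then ([1, 0, 1], [0, 1, 1])
  else
    let zero := (PySem.List.pyRange 3 (n+2) 1).foldl fncAltStep [1, 0, 1]
    let one := [0, 1] ++ PySem.List.slice zero (some 3) (some (n+2))
    (PySem.List.slice zero none (some (n+1)), one)

-- ===== PRECONDITION & SPEC =====
def Spec_fnc (n : Int) (out : List Int × List Int) : Prop := out = fnc_alt n
instance (n : Int) (out : List Int × List Int) : Decidable (Spec_fnc n out) := by unfold Spec_fnc; infer_instance

-- ===== CLAIM (what is proved, stated in full; the proofs are below) =====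
def Claim_equal_fnc : Prop := ∀ (n : Int), Dom_fnc n → Spec_fnc n (fnc n)

-- ===== LEMMAS AND PROOFS =====

-- the common sequence: zero[k] = fibF k, one[k] = fibF (k+1)
def fibF : Nat → Int
  | 0 => 1
  | 1 => 0
  | (k+2) => fibF (k+1) + fibF k

-- A's loop body is the alt step applied componentwise
theorem foldl_fncStep_pair (l : List Int) (a b : List Int) :
    l.foldl fncStep (a, b) = (l.foldl fncAltStep a, l.foldl fncAltStep b) := by
  induction l generalizing a b with
  | nil => rfl
  | cons x xs ih => simp [List.foldl_cons, fncStep, fncAltStep, ih]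

-- the loop over range(3, k+4) extends [g 0, g 1, g 2] to the first k+4 values of g,
-- for any g satisfying the recurrence
theorem loop_eval (g : Nat → Int) (hrec : ∀ k, g (k+2) = g (k+1) + g k) (k : Nat) :
    (PySem.List.pyRange 3 ((k : Int)+4) 1).foldl fncAltStep [g 0, g 1, g 2]
      = (List.range (k+4)).map g := by
  induction k with
  | zero =>
    rw [show ((0:Nat):Int)+4 = 3+1 by norm_num, PySem.List.pyRange_one_succ_right (by norm_num)]
    rw [PySem.List.pyRange_one_eq_nil (by norm_num)]
    have h3 : g 3 = g 2 + g 1 := hrec 1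
    simp [List.range_succ, fncAltStep, PySem.List.pyGetD, h3]
  | succ k ih =>
    have h1 : ((k+1 : Nat) : Int)+4 = ((k:Int)+4)+1 := by push_cast; ring
    rw [h1, PySem.List.pyRange_one_succ_right (by omega), List.foldl_append, ih]
    have hx1 : ((k:Int)+4) - 1 = ((k+3 : Nat) : Int) := by push_cast; ring
    have hx2 : ((k:Int)+4) - 2 = ((k+2 : Nat) : Int) := by push_cast; ring
    simp only [List.foldl_cons, List.foldl_nil, fncAltStep, hx1, hx2,
      PySem.List.pyGetD_natCast]
    rw [List.getD_eq_getElem?_getD, List.getD_eq_getElem?_getD]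
    simp only [List.getElem?_map, List.getElem?_range (by omega : k+3 < k+4),
      List.getElem?_range (by omega : k+2 < k+4), Option.map_some, Option.getD_some]
    have hg : g (k+4) = g (k+3) + g (k+2) := by
      simpa [show k+2+2 = k+4 by ring, show k+2+1 = k+3 by ring] using hrec (k+2)
    rw [show k+1+4 = (k+4)+1 by ring]
    simp [List.range_succ, hg]

-- shifting: [0,1] ++ (first m+5 values of fibF).drop 3 = first m+4 values of fibF (·+1)
theorem shift_eval (m : Nat) :
    (0:Int) :: 1 :: ((List.range (m+5)).map fibF).drop 3
      = (List.range (m+4)).map (fun k => fibF (k+1)) := by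
  apply List.ext_getElem
  · simp
  · intro i h1 h2
    match i with
    | 0 => simp [fibF]
    | 1 => simp [fibF]
    | (i+2) =>
      simp only [List.getElem_cons_succ, List.getElem_drop,
        List.getElem_map, List.getElem_range]
      congr 1
      omega

theorem fnc_alt_eval (k : Nat) :
    fnc_alt ((k:Int)+3)
      = ((List.range (k+4)).map fibF, (List.range (k+4)).map (fun j => fibF (j+1))) := by
  have hlt : ¬ ((k:Int)+3 < 3) := by omega
  have hzeroB : (PySem.List.pyRange 3 ((k:Int)+3+2) 1).foldl fncAltStep [1,0,1]
      = (List.range (k+5)).map fibF := by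
    have := loop_eval fibF (fun j => rfl) (k+1)
    rw [show (k:Int)+3+2 = ((k+1:Nat):Int)+4 by push_cast; ring]
    simpa [fibF, show k+1+4 = k+5 by ring] using this
  simp only [fnc_alt, if_neg hlt, hzeroB, Prod.mk.injEq]
  constructor
  · rw [PySem.List.slice_to _ (by omega : (0:Int) ≤ (k:Int)+3+1)]
    rw [show ((k:Int)+3+1).toNat = k+4 by omega]
    rw [← List.map_take, List.take_range]
    simp
  · rw [PySem.List.slice_toNat _ (by norm_num : (0:Int) ≤ 3) (by omega : (0:Int) ≤ (k:Int)+3+2)]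
    rw [show ((k:Int)+3+2).toNat = k+5 by omega, show ((3:Int)).toNat = 3 by rfl]
    rw [List.take_of_length_le (by simp)]
    have := shift_eval k
    simpa using this

theorem fnc_eq_alt_of_ge (n : Int) (h : 3 ≤ n) : fnc n = fnc_alt n := by
  obtain ⟨k, hk⟩ : ∃ k : Nat, n = (k:Int) + 3 := ⟨(n-3).toNat, by omega⟩
  subst hk
  have h0 : ¬ ((k:Int)+3 = 0) := by omega
  have h1 : ¬ ((k:Int)+3 = 1) := by omega
  have h2 : ¬ ((k:Int)+3 = 2) := by omega
  simp only [fnc, if_neg h0, if_neg h1, if_neg h2]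
  rw [foldl_fncStep_pair, fnc_alt_eval]
  have hzeroA : (PySem.List.pyRange 3 ((k:Int)+3+1) 1).foldl fncAltStep [1,0,1]
      = (List.range (k+4)).map fibF := by
    have := loop_eval fibF (fun j => rfl) k
    rw [show (k:Int)+3+1 = (k:Int)+4 by ring]
    simpa [fibF] using this
  have honeA : (PySem.List.pyRange 3 ((k:Int)+3+1) 1).foldl fncAltStep [0,1,1]
      = (List.range (k+4)).map (fun j => fibF (j+1)) := by
    have := loop_eval (fun j => fibF (j+1)) (fun j => rfl) k
    rw [show (k:Int)+3+1 = (k:Int)+4 by ring]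
    simpa [fibF] using this
  rw [hzeroA, honeA]

theorem fnc_eq_alt_of_lt (n : Int) (h : n < 3) : fnc n = fnc_alt n := by
  unfold fnc fnc_alt
  rw [if_pos h]
  by_cases h0 : n = 0
  · simp [h0]
  by_cases h1 : n = 1
  · simp [h1]
  by_cases h2 : n = 2
  · simp [h2]
  rw [if_neg h0, if_neg h1, if_neg h2]
  rw [PySem.List.pyRange_one_eq_nil (by omega)]
  rfl

-- ===== VERDICT (by name: the statement is the Claim_ definition above) =====
theorem fnc_spec : Claim_equal_fnc := by
  intro n _
  unfold Spec_fnc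
  rcases lt_or_ge n 3 with h | h
  · exact fnc_eq_alt_of_lt n h
  · exact fnc_eq_alt_of_ge n h
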